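-- pv_equiv track=rewrite | github.com/miliar/Code_Jam_Webscraper | solutions_python/solutions_year16_round1_nr1/1687.py | gen_last_word
-- ===== SOURCE A (Python) =====
-- from collections import deque
--
-- def gen_last_word(s):
--     res = ""
--     q = deque()
--     for c in s:
--         if not q:
--             q.append(c)
--         else:
--             if c < q[0]:
--                 # If c is strictly less than first char then append to back of queue.
--                 q.append(c)
--
--             else:
--                 q.appendleft(c)
--
--     for c in q:
--         res += (c)
--
--     return res
-- ===== SOURCE B (Python) =====
-- def first_greater(s, c):
--     # index of the first character of s strictly greater than c, or len(s)
--     for j, d in enumerate(s):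
--         if d > c:
--             return j
--     return len(s)
--
-- def gen_last_word(s):
--     # A character at index i goes to the front part iff no strictly greater
--     # character occurs before it, i.e. iff i < first_greater(s, c).
--     greater_at = {c: first_greater(s, c) for c in set(s)}
--     records, others = [], []
--     i = 0
--     for c in s:
--         if i < greater_at[c]:
--             records.append(c)
--         else:
--             others.append(c)
--         i += 1
--     return ''.join(reversed(records)) + ''.join(others)
-- ===== Notes on version B (the rewrite author's own statement) =====
-- stated objective: alternative
-- what changed: Replaces A's online deque simulation with a table-driven two-phase algorithm: precompute, for each distinct character, the index of the first strictly greater character in the string, then classify every position into front/back by a dict lookup (i < greater_at[c]) and assemble reversed front + back; no running state is compared between consecutive characters.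
import Mathlib
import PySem

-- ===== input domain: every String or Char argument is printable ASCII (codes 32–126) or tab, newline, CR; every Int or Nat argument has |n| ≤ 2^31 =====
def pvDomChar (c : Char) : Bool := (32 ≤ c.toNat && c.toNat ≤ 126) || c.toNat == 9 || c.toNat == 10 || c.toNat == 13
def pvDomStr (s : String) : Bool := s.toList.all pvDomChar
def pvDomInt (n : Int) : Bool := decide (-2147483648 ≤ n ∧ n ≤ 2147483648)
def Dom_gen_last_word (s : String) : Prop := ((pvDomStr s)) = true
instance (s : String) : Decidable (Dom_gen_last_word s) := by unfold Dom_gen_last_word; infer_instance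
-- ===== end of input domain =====

-- B replaces A's online deque simulation by a table-driven two-phase algorithm: for each
-- distinct character it precomputes the index of the first strictly greater character,
-- then classifies every position by a table lookup (objective: alternative, same result).

-- ===== PORT A =====
-- literal port of A: the deque as a List Char; appendleft = cons, append = q ++ [c]
def genLastWordStepA (q : List Char) (c : Char) : List Char :=
  if q = [] then q ++ [c]
  else if c < q.headI then q ++ [c]
  else c :: q

def gen_last_word (s : String) : String :=
  String.mk (s.toList.foldl genLastWordStepA [])

-- ===== PORT B =====
-- first_greater(s, c): index of the first char of s strictly greater than c, else len(s)
def firstGreater (s : List Char) (c : Char) : Nat :=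
  match s with
  | [] => 0
  | d :: t => if c < d then 0 else firstGreater t c + 1

-- body of B's classification loop (i is the running index; the dict key is always present,
-- so getD with default 0 is exact for Python's greater_at[c])
def genLastWordAltStep (ga : PySem.Dict Char Nat) (st : Nat × List Char × List Char)
    (c : Char) : Nat × List Char × List Char :=
  match st with
  | (i, records, others) =>
    if i < ga.getD c 0 then (i + 1, records ++ [c], others)
    else (i + 1, records, others ++ [c])

def gen_last_word_alt (s : String) : String :=
  let l := s.toList
  let ga : PySem.Dict Char Nat :=
    (PySem.Set.ofList l).foldl (fun d c => d.insert c (firstGreater l c)) PySem.Dict.empty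
  let st := l.foldl (genLastWordAltStep ga) (0, [], [])
  String.mk (st.2.1.reverse ++ st.2.2)

-- ===== PRECONDITION & SPEC =====
def Spec_gen_last_word (s : String) (out : String) : Prop := out = gen_last_word_alt s
instance (s : String) (out : String) : Decidable (Spec_gen_last_word s out) := by unfold Spec_gen_last_word; infer_instance

-- ===== CLAIM (what is proved, stated in full; the proofs are below) =====
def Claim_equal_gen_last_word : Prop := ∀ (s : String), Dom_gen_last_word s → Spec_gen_last_word s (gen_last_word s)

-- ===== LEMMAS AND PROOFS =====

-- proof-side intermediate loop: running max + (front, back) partition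
def midStep (st : Option Char × List Char × List Char) (c : Char) :
    Option Char × List Char × List Char :=
  match st with
  | (m, front, back) =>
    match m with
    | none => (some c, front ++ [c], back)
    | some mx => if mx ≤ c then (some c, front ++ [c], back) else (some mx, front, back ++ [c])

-- invariant relating A's deque to the intermediate (max, front, back) state
def GenLastWordInv (q : List Char) (m : Option Char) (front back : List Char) : Prop :=
  q = front.reverse ++ back ∧
    (match front.reverse with
     | [] => back = [] ∧ m = none
     | d :: _ => m = some d)

theorem genLastWord_loop (l q : List Char) (m : Option Char) (front back : List Char)
    (h : GenLastWordInv q m front back) :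
    ∃ m' front' back', l.foldl midStep (m, front, back) = (m', front', back') ∧
      GenLastWordInv (l.foldl genLastWordStepA q) m' front' back' := by
  induction l generalizing q m front back with
  | nil => exact ⟨m, front, back, rfl, h⟩
  | cons c l ih =>
    obtain ⟨hq, hm⟩ := h
    simp only [List.foldl_cons]
    rcases hrev : front.reverse with _ | ⟨d, rest⟩
    · rw [hrev] at hm
      obtain ⟨hb, hmn⟩ := hm
      have hf : front = [] := by
        have := congrArg List.reverse hrev; simpa using this
      subst hb hmn hf
      simp only [List.reverse_nil, List.nil_append] at hq
      subst hq
      apply ih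
      constructor
      · simp [genLastWordStepA]
      · simp
    · rw [hrev] at hm
      subst hm
      have hqne : q ≠ [] := by
        rw [hq, hrev]; simp
      have hqh : q.headI = d := by rw [hq, hrev]; rfl
      by_cases hc : c < d
      · have hstepA : genLastWordStepA q c = q ++ [c] := by
          simp [genLastWordStepA, hqne, hqh, hc]
        have hstepB : midStep (some d, front, back) c = (some d, front, back ++ [c]) := by
          simp [midStep, not_le.mpr hc]
        rw [hstepA, hstepB]
        apply ih
        refine ⟨by rw [hq]; simp, ?_⟩
        rw [hrev]
      · have hstepA : genLastWordStepA q c = c :: q := by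
          simp [genLastWordStepA, hqne, hqh, hc]
        have hstepB : midStep (some d, front, back) c = (some c, front ++ [c], back) := by
          simp [midStep, not_lt.mp hc]
        rw [hstepA, hstepB]
        apply ih
        refine ⟨by rw [hq]; simp, ?_⟩
        simp

-- i < first_greater(seen ++ c :: rest, c) at i = len(seen)  ⟺  no char of seen exceeds c
theorem fg_gt_iff (seen : List Char) (c : Char) (rest : List Char) :
    seen.length < firstGreater (seen ++ c :: rest) c ↔ ∀ d ∈ seen, d ≤ c := by
  induction seen with
  | nil => simp [firstGreater]
  | cons d seen ih =>
    by_cases hc : c < d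
    · simp [firstGreater, hc, not_le.mpr hc]
    · simp only [List.cons_append, firstGreater, if_neg hc, List.length_cons,
        List.mem_cons, forall_eq_or_imp]
      constructor
      · intro h
        exact ⟨not_lt.mp hc, ih.mp (by omega)⟩
      · intro h
        have := ih.mpr h.2
        omega

-- the dict built by B returns first_greater l c for every c ∈ l
theorem ga_getD (l : List Char) (c : Char) (hc : c ∈ l) :
    ((PySem.Set.ofList l).foldl (fun d c => d.insert c (firstGreater l c))
        PySem.Dict.empty).getD c 0 = firstGreater l c := by
  have hitems := PySem.Dict.items_foldl_insert_fresh (l := PySem.Set.ofList l)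
    (k := fun a : Char => a) (v := fun a => firstGreater l a) (d := PySem.Dict.empty)
    (by intro a _; exact PySem.Dict.contains_empty a)
    (by simp [PySem.Set.nodup_ofList l])
  beta_reduce at hitems
  refine PySem.Dict.getD_of_mem_items _ ?_
    (PySem.Dict.nodup_keys_foldl_insert _ _ _ PySem.Dict.nodup_keys_empty) 0
  rw [hitems]
  simp only [PySem.Dict.empty, List.nil_append]
  exact List.mem_map_of_mem ((PySem.Set.mem_ofList l c).mpr hc)

-- the intermediate loop and B's table-lookup loop produce the same (front, back)
theorem mid_eq_alt (l : List Char) (ga : PySem.Dict Char Nat)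
    (hga : ∀ c ∈ l, ga.getD c 0 = firstGreater l c) :
    ∀ (t seen front back : List Char) (m : Option Char),
      l = seen ++ t →
      (m = none → seen = []) →
      (∀ mx, m = some mx → mx ∈ seen ∧ ∀ d ∈ seen, d ≤ mx) →
      (t.foldl midStep (m, front, back)).2 =
        (t.foldl (genLastWordAltStep ga) (seen.length, front, back)).2 := by
  intro t
  induction t with
  | nil => intro seen front back m _ _ _; rfl
  | cons c t ih =>
    intro seen front back m hl hnone hsome
    have hcl : c ∈ l := by rw [hl]; simp
    have hcond : (seen.length < ga.getD c 0) ↔ ∀ d ∈ seen, d ≤ c := by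
      rw [hga c hcl, hl, fg_gt_iff]
    have hlen : seen.length + 1 = (seen ++ [c]).length := by simp
    have hl' : l = (seen ++ [c]) ++ t := by rw [hl]; simp
    have hlen : seen.length + 1 = (seen ++ [c]).length := by simp
    simp only [List.foldl_cons]
    rcases m with _ | mx
    · have hs : seen = [] := hnone rfl
      subst hs
      have hA : genLastWordAltStep ga (([] : List Char).length, front, back) c
          = ((([] : List Char) ++ [c]).length, front ++ [c], back) := by
        have hc0 : 0 < ga.getD c 0 := by simpa using hcond.mpr (by simp)
        simp only [genLastWordAltStep, List.length_nil, List.nil_append, List.length_cons]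
        rw [if_pos hc0]
      have hM : midStep (none, front, back) c = (some c, front ++ [c], back) := rfl
      rw [hA, hM]
      exact ih ([] ++ [c]) (front ++ [c]) back (some c) (by rw [hl]; rfl)
        (by intro h; cases h) (by rintro mx hmx; cases hmx; exact ⟨by simp, by simp⟩)
    · obtain ⟨hmem, hall⟩ := hsome mx rfl
      by_cases hmc : mx ≤ c
      · have hallc : ∀ d ∈ seen, d ≤ c := fun d hd => le_trans (hall d hd) hmc
        have hA : genLastWordAltStep ga (seen.length, front, back) c
            = ((seen ++ [c]).length, front ++ [c], back) := by
          simp only [genLastWordAltStep, List.length_append, List.length_cons,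
            List.length_nil]
          rw [if_pos (hcond.mpr hallc)]
        have hM : midStep (some mx, front, back) c = (some c, front ++ [c], back) := by
          simp [midStep, hmc]
        rw [hA, hM]
        refine ih (seen ++ [c]) (front ++ [c]) back (some c) (by rw [hl]; simp)
          (by intro h; cases h) ?_
        rintro mx' hmx'
        cases hmx'
        refine ⟨by simp, ?_⟩
        intro d hd
        rcases List.mem_append.mp hd with hd | hd
        · exact hallc d hd
        · simp only [List.mem_singleton] at hd; subst hd; exact le_refl _
      · have hncond : ¬ (∀ d ∈ seen, d ≤ c) := fun h => hmc (h mx hmem)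
        have hA : genLastWordAltStep ga (seen.length, front, back) c
            = ((seen ++ [c]).length, front, back ++ [c]) := by
          simp only [genLastWordAltStep, List.length_append, List.length_cons,
            List.length_nil]
          rw [if_neg (fun h => hncond (hcond.mp h))]
        have hM : midStep (some mx, front, back) c = (some mx, front, back ++ [c]) := by
          simp [midStep, hmc]
        rw [hA, hM]
        refine ih (seen ++ [c]) front (back ++ [c]) (some mx) (by rw [hl]; simp)
          (by intro h; cases h) ?_
        rintro mx' hmx'
        cases hmx'
        refine ⟨by simp [hmem], ?_⟩
        intro d hd
        rcases List.mem_append.mp hd with hd | hd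
        · exact hall d hd
        · simp only [List.mem_singleton] at hd; subst hd; exact le_of_lt (not_le.mp hmc)

-- ===== VERDICT (by name: the statement is the Claim_ definition above) =====
theorem gen_last_word_spec : Claim_equal_gen_last_word := by
  intro s _
  simp only [Spec_gen_last_word, gen_last_word, gen_last_word_alt]
  obtain ⟨m', f', b', heq, hq, -⟩ :=
    genLastWord_loop s.toList [] none [] [] ⟨rfl, by simp⟩
  have h2 := mid_eq_alt s.toList
    ((PySem.Set.ofList s.toList).foldl
      (fun d c => d.insert c (firstGreater s.toList c)) PySem.Dict.empty)
    (fun c hc => ga_getD s.toList c hc)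
    s.toList [] [] [] none rfl (fun _ => rfl) (by intro mx h; cases h)
  rw [heq] at h2
  simp only [List.length_nil] at h2
  rw [hq, ← h2]
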